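-- pv_equiv track=rewrite | github.com/zivoy/flowaboat | replay_parser.py | split_on_double
-- ===== SOURCE A (Python) =====
-- def split_on_double(item_list):
--     """
--     split list every time a element is doubled
--     :param item_list: list
--     :return: list of lists
--     """
--     last = item_list[0]
--     l_index = 0
--     split_list = list()
--     for i, j in list(enumerate(item_list))[1:]:
--         if j == last:
--             split_list.append(item_list[l_index:i])
--             l_index = i
--         last = j
--     split_list.append(item_list[l_index:])
--     return split_list
-- ===== SOURCE B (Python) =====
-- def split_on_double(item_list):
--     """
--     split list every time a element is doubled
--     :param item_list: list
--     :return: list of lists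
--     """
--     result = []
--     current = [item_list[0]]
--     for x in item_list[1:]:
--         if x == current[-1]:
--             result.append(current)
--             current = [x]
--         else:
--             current.append(x)
--     result.append(current)
--     return result
-- ===== Notes on version B (the rewrite author's own statement) =====
-- stated objective: alternative
-- what changed: A tracks a previous element and a moving left index and emits index slices of the input; B never indexes or slices after the first element: it builds each chunk element-by-element in a 'current' accumulator, closing the chunk whenever the incoming element equals the chunk's last element.
import Mathlib
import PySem

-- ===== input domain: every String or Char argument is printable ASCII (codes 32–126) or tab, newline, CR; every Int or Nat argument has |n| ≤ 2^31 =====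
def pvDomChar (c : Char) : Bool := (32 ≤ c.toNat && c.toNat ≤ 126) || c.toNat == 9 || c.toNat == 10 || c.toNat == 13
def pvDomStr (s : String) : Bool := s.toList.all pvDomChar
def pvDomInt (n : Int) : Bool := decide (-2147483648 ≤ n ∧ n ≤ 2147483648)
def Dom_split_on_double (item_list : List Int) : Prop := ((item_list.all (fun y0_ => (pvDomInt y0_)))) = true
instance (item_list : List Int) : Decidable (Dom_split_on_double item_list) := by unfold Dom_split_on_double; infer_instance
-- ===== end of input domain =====

-- B replaces A's index bookkeeping (previous element + moving left index + slices)
-- by building each chunk element-by-element in a running 'current' accumulator (objective: alternative).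

-- ===== PORT A =====
-- literal port of A: track (last, l_index, split_list) over list(enumerate(item_list))[1:]
def split_on_double (item_list : List Int) : List (List Int) :=
  match PySem.List.pyGet? item_list 0 with
  | none => []  -- Python raises IndexError here; excluded by Pre_
  | some last0 =>
    let s := ((PySem.List.enumerate item_list 0).drop 1).foldl
      (fun (st : Int × Int × List (List Int)) (ij : Int × Int) =>
        let st' := if ij.2 == st.1
          then (ij.1, st.2.2 ++ [PySem.List.slice item_list (some st.2.1) (some ij.1)])
          else (st.2.1, st.2.2)
        (ij.2, st'))
      (last0, (0 : Int), ([] : List (List Int)))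
    s.2.2 ++ [PySem.List.slice item_list (some s.2.1) none]

-- ===== PORT B =====
-- port of Source B: fold over item_list[1:] with state (result, current); close the chunk
-- when the element equals current[-1], else append it to current
def split_on_double_alt (item_list : List Int) : List (List Int) :=
  match PySem.List.pyGet? item_list 0 with
  | none => []  -- Python raises IndexError here; excluded by Pre_
  | some x0 =>
    let s := (PySem.List.slice item_list (some 1) none).foldl
      (fun (st : List (List Int) × List Int) (x : Int) =>
        if x == PySem.List.pyGetD st.2 (-1) 0
          then (st.1 ++ [st.2], [x])
          else (st.1, st.2 ++ [x]))
      (([] : List (List Int)), [x0])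
    s.1 ++ [s.2]

-- ===== PRECONDITION & SPEC =====
-- Pre_ excludes only the empty list, on which A raises IndexError (item_list[0]).
def Pre_split_on_double (item_list : List Int) : Prop := item_list ≠ []
instance (item_list : List Int) : Decidable (Pre_split_on_double item_list) := by
  unfold Pre_split_on_double; infer_instance
def pvWitness_split_on_double : List Int := [1, 1, 2]

def Spec_split_on_double (item_list : List Int) (out : List (List Int)) : Prop := out = split_on_double_alt item_list
instance (item_list : List Int) (out : List (List Int)) : Decidable (Spec_split_on_double item_list out) := by unfold Spec_split_on_double; infer_instance

-- ===== CLAIM (what is proved, stated in full; the proofs are below) =====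
def Claim_equal_split_on_double : Prop := ∀ (item_list : List Int), Dom_split_on_double item_list → Pre_split_on_double item_list → Spec_split_on_double item_list (split_on_double item_list)

-- ===== LEMMAS AND PROOFS =====

-- main invariant: at position k (1 ≤ k ≤ n, with the last cut at li < k), A's
-- remaining fold (over enumerate, emitting slices) and B's remaining fold (over the
-- elements, with current = L[li:k]) finish with the same list of chunks.
lemma split_on_double_main (L : List Int) (m : Nat) :
    ∀ (k li : Nat) (acc : List (List Int)),
      k ≤ L.length → 1 ≤ k → li < k → m = L.length - k →
      (let sA := (PySem.List.enumerate (L.drop k) (k : Int)).foldl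
        (fun (st : Int × Int × List (List Int)) (ij : Int × Int) =>
          let st' := if ij.2 == st.1
            then (ij.1, st.2.2 ++ [PySem.List.slice L (some st.2.1) (some ij.1)])
            else (st.2.1, st.2.2)
          (ij.2, st'))
        (PySem.List.pyGetD L ((k : Int) - 1) 0, (li : Int), acc)
       sA.2.2 ++ [PySem.List.slice L (some sA.2.1) none]) =
      (let sB := (L.drop k).foldl
        (fun (st : List (List Int) × List Int) (x : Int) =>
          if x == PySem.List.pyGetD st.2 (-1) 0
            then (st.1 ++ [st.2], [x])
            else (st.1, st.2 ++ [x]))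
        (acc, (L.drop li).take (k - li))
       sB.1 ++ [sB.2]) := by
  induction m with
  | zero =>
    intro k li acc hk h1 hli hm
    have hkn : k = L.length := by omega
    subst hkn
    have htk : ((L.drop li).take (L.length - li)) = L.drop li := by
      apply List.take_of_length_le; simp
    simp [PySem.List.slice_from_natCast, htk]
  | succ m ih =>
    intro k li acc hk h1 hli hm
    have hlt : k < L.length := by omega
    have hdrop : L.drop k = L[k] :: L.drop (k + 1) := List.drop_eq_getElem_cons hlt
    -- the current chunk and its last element
    have hcurlen : ((L.drop li).take (k - li)).length = k - li := by
      simp; omega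
    have hcurne : ((L.drop li).take (k - li)) ≠ [] := by
      intro h; rw [h] at hcurlen; simp at hcurlen; omega
    have hlastA : PySem.List.pyGetD L ((k : Int) - 1) 0 = L[k - 1]'(by omega) := by
      rw [show ((k : Int) - 1) = (((k - 1 : Nat) : Int)) by omega]
      rw [PySem.List.pyGetD_natCast]
      exact List.getD_eq_getElem _ _ (by omega)
    have hlastB : PySem.List.pyGetD ((L.drop li).take (k - li)) (-1) 0
        = L[k - 1]'(by omega) := by
      rw [PySem.List.pyGetD_neg_one _ _ hcurne, List.getLast_eq_getElem]
      simp only [hcurlen]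
      rw [List.getElem_take, List.getElem_drop]
      congr 1; omega
    have hgetk : PySem.List.pyGetD L (k : Int) 0 = L[k] := by
      rw [PySem.List.pyGetD_natCast]; exact List.getD_eq_getElem _ _ hlt
    have hcast : ((k : Int) + 1) = (((k + 1 : Nat) : Int)) := by push_cast; ring
    have hlast' : PySem.List.pyGetD L (((k + 1 : Nat) : Int) - 1) 0 = L[k] := by
      rw [show (((k + 1 : Nat) : Int) - 1) = ((k : Nat) : Int) by omega]; exact hgetk
    rw [hdrop, PySem.List.enumerate_cons]
    simp only [List.foldl_cons]
    by_cases hc : L[k] = L[k - 1]'(by omega)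
    · have hbA : (L[k] == PySem.List.pyGetD L ((k : Int) - 1) 0) = true := by
        simp [hlastA, hc]
      have hbB : (L[k] == PySem.List.pyGetD ((L.drop li).take (k - li)) (-1) 0) = true := by
        simp [hlastB, hc]
      simp only [hbA, hbB, if_true]
      have hslice : PySem.List.slice L (some (li : Int)) (some (k : Int))
          = (L.drop li).take (k - li) := PySem.List.slice_natCast L li k
      have hsingle : [L[k]] = (L.drop k).take (k + 1 - k) := by
        rw [show k + 1 - k = 1 by omega, hdrop]; rfl
      rw [hcast, hslice, hsingle]
      have := ih (k + 1) k (acc ++ [(L.drop li).take (k - li)])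
        (by omega) (by omega) (by omega) (by omega)
      simpa only [hlast'] using this
    · have hbA : (L[k] == PySem.List.pyGetD L ((k : Int) - 1) 0) = false := by
        simp [hlastA, hc]
      have hbB : (L[k] == PySem.List.pyGetD ((L.drop li).take (k - li)) (-1) 0) = false := by
        simp [hlastB, hc]
      simp only [hbA, hbB, Bool.false_eq_true, if_false]
      have hext : (L.drop li).take (k - li) ++ [L[k]] = (L.drop li).take (k + 1 - li) := by
        rw [show k + 1 - li = (k - li) + 1 by omega, List.take_add_one]
        congr 1
        rw [List.getElem?_eq_getElem (by simp; omega)]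
        simp [List.getElem_drop]
        congr 1; omega
      rw [hcast, hext]
      have := ih (k + 1) li acc (by omega) (by omega) (by omega) (by omega)
      simpa only [hlast'] using this

-- ===== VERDICT (by name: the statement is the Claim_ definition above) =====
theorem split_on_double_spec : Claim_equal_split_on_double := by
  intro L _ hpre
  cases L with
  | nil => exact absurd rfl hpre
  | cons x xs =>
    have h0 : PySem.List.pyGet? (x :: xs) 0 = some x := by
      simp [PySem.List.pyGet?, PySem.List.pyIdx?]
    have hlast1 : PySem.List.pyGetD (x :: xs) (((1 : Nat) : Int) - 1) 0 = x := by
      norm_num [PySem.List.pyGetD, PySem.List.pyIdx?]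
    have key := split_on_double_main (x :: xs) ((x :: xs).length - 1) 1 0 []
      (by simp) (le_refl 1) (by omega) rfl
    rw [hlast1] at key
    simp only [Spec_split_on_double, split_on_double, split_on_double_alt, h0]
    simp only [Nat.cast_one] at key
    simpa [PySem.List.enumerate_cons, PySem.List.slice_from_one] using key
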